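-- pv_equiv track=rewrite | github.com/CyrChudac/BioinfoAlgos | MsaStructure.py | findResi
-- ===== SOURCE A (Python) =====
-- def findResi(seq, num):
--     found = 0
--     curr = 0
--     while found < num and curr < len(seq):
--         if seq[curr] != "-":
--             found += 1
--         curr += 1
--     if found == num:
--         return curr
--     return -1
-- ===== SOURCE B (Python) =====
-- def findResi(seq, num):
--     positions = [i for i, c in enumerate(seq) if c != "-"]
--     if num == 0:
--         return 0
--     if 0 < num <= len(positions):
--         return positions[num - 1] + 1
--     return -1
-- ===== Notes on version B (the rewrite author's own statement) =====
-- stated objective: alternative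
-- what changed: Replaces the early-exiting counting while-loop with a one-shot comprehension building the index table of non-gap positions followed by a direct arithmetic lookup.
import Mathlib
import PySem

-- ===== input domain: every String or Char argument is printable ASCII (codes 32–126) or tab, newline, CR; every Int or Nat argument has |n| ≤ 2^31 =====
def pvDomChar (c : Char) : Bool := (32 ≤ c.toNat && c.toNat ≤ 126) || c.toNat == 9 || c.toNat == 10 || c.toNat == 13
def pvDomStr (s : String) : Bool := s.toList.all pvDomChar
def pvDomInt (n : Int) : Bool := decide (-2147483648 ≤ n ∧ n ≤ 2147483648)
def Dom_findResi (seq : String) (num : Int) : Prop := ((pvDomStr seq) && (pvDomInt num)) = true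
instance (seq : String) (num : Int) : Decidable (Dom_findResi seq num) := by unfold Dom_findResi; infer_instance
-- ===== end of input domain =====

-- B replaces A's early-exiting counting while-loop by an index table of all
-- non-gap positions plus a direct lookup (alternative decomposition, same cost).

-- ===== PORT A =====
-- the while-loop of A: state (found, curr), scanning the remaining characters
def findResiLoop : List Char → Int → Int → Int → Int
  | [], num, found, curr => if found = num then curr else -1
  | c :: rest, num, found, curr =>
    if found < num then
      findResiLoop rest num (if c ≠ '-' then found + 1 else found) (curr + 1)
    else if found = num then curr else -1

def findResi (seq : String) (num : Int) : Int :=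
  findResiLoop seq.toList num 0 0

-- ===== PORT B =====
def findResi_alt (seq : String) (num : Int) : Int :=
  -- positions = [i for i, c in enumerate(seq) if c != "-"]
  let positions : List Nat := (seq.toList.zipIdx.filter (fun p => p.1 ≠ '-')).map Prod.snd
  if num = 0 then 0
  else if 0 < num ∧ num ≤ (positions.length : Int) then
    ((positions.getD (num - 1).toNat 0 : Nat) : Int) + 1
  else -1

-- ===== PRECONDITION & SPEC =====
def Spec_findResi (seq : String) (num : Int) (out : Int) : Prop := out = findResi_alt seq num
instance (seq : String) (num : Int) (out : Int) : Decidable (Spec_findResi seq num out) := by unfold Spec_findResi; infer_instance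

-- ===== CLAIM (what is proved, stated in full; the proofs are below) =====
def Claim_equal_findResi : Prop := ∀ (seq : String) (num : Int), Dom_findResi seq num → Spec_findResi seq num (findResi seq num)

-- ===== LEMMAS AND PROOFS =====

-- the non-gap index table of B, as a function of the character list
def posL (cs : List Char) : List Nat :=
  (cs.zipIdx.filter (fun p => p.1 ≠ '-')).map Prod.snd

theorem posL_cons (c : Char) (rest : List Char) :
    posL (c :: rest) =
      if c = '-' then (posL rest).map (· + 1)
      else 0 :: (posL rest).map (· + 1) := by
  by_cases h : c = '-' <;>
    simp [posL, List.zipIdx_cons, List.zipIdx_succ, List.filter_map, List.map_map,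
          Function.comp_def, h]

-- characterisation of A's loop by B's index table
theorem findResiLoop_char (cs : List Char) :
    ∀ (num found curr : Int), found ≤ num →
      findResiLoop cs num found curr =
        if found = num then curr
        else
          match (posL cs)[(num - found - 1).toNat]? with
          | some p => curr + (p : Int) + 1
          | none => -1 := by
  induction cs with
  | nil =>
    intro num found curr _
    simp only [findResiLoop, posL, List.zipIdx_nil, List.filter_nil, List.map_nil,
      List.getElem?_nil]
  | cons c rest ih =>
    intro num found curr hle
    by_cases heq : found = num
    · simp [findResiLoop, heq]
    · have hlt : found < num := lt_of_le_of_ne hle heq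
      rw [posL_cons]
      by_cases hc : c = '-'
      · -- gap: found unchanged, curr advances
        rw [if_pos hc]
        have step : findResiLoop (c :: rest) num found curr
            = findResiLoop rest num found (curr + 1) := by
          simp [findResiLoop, if_pos hlt, hc]
        rw [step, ih num found (curr + 1) hle, if_neg heq, if_neg heq,
          List.getElem?_map]
        rcases hget : (posL rest)[(num - found - 1).toNat]? with _ | p
        · simp
        · simp only [Option.map_some]
          push_cast
          ring
      · -- non-gap: found + 1, curr advances
        rw [if_neg hc]
        have hle' : found + 1 ≤ num := hlt
        have step : findResiLoop (c :: rest) num found curr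
            = findResiLoop rest num (found + 1) (curr + 1) := by
          simp [findResiLoop, if_pos hlt, hc]
        rw [step, ih num (found + 1) (curr + 1) hle', if_neg heq]
        by_cases heq' : found + 1 = num
        · rw [if_pos heq', show (num - found - 1).toNat = 0 from by omega]
          simp
        · rw [if_neg heq',
            show (num - found - 1).toNat = (num - (found + 1) - 1).toNat + 1 from by omega,
            List.getElem?_cons_succ, List.getElem?_map]
          rcases hget : (posL rest)[(num - (found + 1) - 1).toNat]? with _ | p
          · simp
          · simp only [Option.map_some]
            push_cast
            ring

-- ===== VERDICT (by name: the statement is the Claim_ definition above) =====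
theorem findResi_spec : Claim_equal_findResi := by
  intro seq num _
  unfold Spec_findResi findResi findResi_alt
  show findResiLoop seq.toList num 0 0 = _
  by_cases h0 : num = 0
  · subst h0
    cases seq.toList <;> simp [findResiLoop]
  · by_cases hpos : 0 < num
    · have h := findResiLoop_char seq.toList num 0 0 (by omega)
      rw [h, if_neg (by omega : ¬(0 : Int) = num),
        show (num - 0 - 1 : Int) = num - 1 from by ring]
      simp only [if_neg h0]
      have hfold : (seq.toList.zipIdx.filter (fun p => p.1 ≠ '-')).map Prod.snd
          = posL seq.toList := rfl
      rw [hfold]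
      by_cases hlen : num ≤ ((posL seq.toList).length : Int)
      · have hkl : (num - 1).toNat < (posL seq.toList).length := by omega
        rw [List.getElem?_eq_getElem hkl, if_pos ⟨hpos, hlen⟩,
          List.getD_eq_getElem _ _ hkl]
        ring
      · rw [List.getElem?_eq_none_iff.mpr (by omega),
          if_neg (by omega : ¬(0 < num ∧ num ≤ ((posL seq.toList).length : Int)))]
    · -- num < 0: loop exits immediately with -1; both of B's guards fail
      have hA : findResiLoop seq.toList num 0 0 = -1 := by
        cases seq.toList <;> simp [findResiLoop] <;> omega
      rw [hA, if_neg h0]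
      split_ifs with h1
      · exact absurd h1.1 hpos
      · rfl
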